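-- pv_equiv track=rewrite | github.com/skatld123/practice_coding | Programmers/2Stage/스킬트리_복기필요.py | solution
-- ===== SOURCE A (Python) =====
-- def solution(skill, skill_trees):
--     answer = 0
--     for skt in skill_trees:
--         s = ""
--         for ch in skt:
--             if ch in skill:
--                 s += ch
--         if skill[:len(s)] == s:
--             answer += 1
--     return answer
-- ===== SOURCE B (Python) =====
-- def solution(skill, skill_trees):
--     answer = 0
--     for skt in skill_trees:
--         idx = 0
--         ok = True
--         for ch in skt:
--             if ch in skill:
--                 if idx < len(skill) and skill[idx] == ch:
--                     idx += 1
--                 else: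
--                     ok = False
--                     break
--         if ok:
--             answer += 1
--     return answer
-- ===== Notes on version B (the rewrite author's own statement) =====
-- stated objective: simpler
-- what changed: Replaced building a filtered intermediate string and comparing it against a slice of skill with a single fused scan that keeps only an integer cursor into skill and breaks early on the first mismatch.
import Mathlib
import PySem

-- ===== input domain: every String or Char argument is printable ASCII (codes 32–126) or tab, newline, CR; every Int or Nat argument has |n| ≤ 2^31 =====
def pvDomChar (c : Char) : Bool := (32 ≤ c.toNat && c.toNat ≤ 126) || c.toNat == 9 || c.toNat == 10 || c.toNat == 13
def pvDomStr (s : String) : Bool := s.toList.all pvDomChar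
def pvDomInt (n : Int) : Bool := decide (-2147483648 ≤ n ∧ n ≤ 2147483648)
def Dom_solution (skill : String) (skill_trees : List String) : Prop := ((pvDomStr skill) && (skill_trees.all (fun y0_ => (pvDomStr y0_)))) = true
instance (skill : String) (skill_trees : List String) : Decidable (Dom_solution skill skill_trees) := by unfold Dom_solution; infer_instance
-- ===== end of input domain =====

-- B replaces A's build-filtered-string-then-slice-compare with a single scan keeping an
-- integer cursor into skill (simpler: no intermediate string).

-- ===== PORT A =====
-- 'ch in skill' on a single character equals character membership (exact for len-1 needles)
def solution (skill : String) (skill_trees : List String) : Int :=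
  skill_trees.foldl
    (fun answer skt =>
      let s := skt.toList.foldl
        (fun s ch => if skill.toList.contains ch then s ++ [ch] else s) []
      -- skill[:len(s)] == s : slice with nonnegative in-range stop = take
      if skill.toList.take s.length = s then answer + 1 else answer)
    0

-- ===== PORT B =====
-- the inner loop of Source B: cursor idx, early break on failure
def scanTree (skill : List Char) : List Char → Nat → Bool
  | [], _ => true
  | ch :: rest, idx =>
    if skill.contains ch then
      if h : idx < skill.length then
        if skill.get ⟨idx, h⟩ = ch then scanTree skill rest (idx + 1) else false
      else false
    else scanTree skill rest idx

def solution_alt (skill : String) (skill_trees : List String) : Int :=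
  skill_trees.foldl
    (fun answer skt => if scanTree skill.toList skt.toList 0 then answer + 1 else answer)
    0

-- ===== PRECONDITION & SPEC =====
def Spec_solution (skill : String) (skill_trees : List String) (out : Int) : Prop := out = solution_alt skill skill_trees
instance (skill : String) (skill_trees : List String) (out : Int) : Decidable (Spec_solution skill skill_trees out) := by unfold Spec_solution; infer_instance

-- ===== CLAIM (what is proved, stated in full; the proofs are below) =====
def Claim_equal_solution : Prop := ∀ (skill : String) (skill_trees : List String), Dom_solution skill skill_trees → Spec_solution skill skill_trees (solution skill skill_trees)

-- ===== LEMMAS AND PROOFS =====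

-- the cursor scan succeeds iff the filtered characters form a prefix of skill after idx
lemma scanTree_iff (skill : List Char) (t : List Char) (idx : Nat) :
    scanTree skill t idx = true ↔ t.filter (skill.contains ·) <+: skill.drop idx := by
  induction t generalizing idx with
  | nil => simp [scanTree]
  | cons ch rest ih =>
    by_cases hc : skill.contains ch
    · simp only [scanTree, if_pos, List.filter_cons, hc]
      by_cases hlt : idx < skill.length
      · rw [dif_pos hlt]
        have hdrop : skill.drop idx = skill.get ⟨idx, hlt⟩ :: skill.drop (idx + 1) :=
          List.drop_eq_getElem_cons hlt
        by_cases heq : skill.get ⟨idx, hlt⟩ = ch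
        · rw [if_pos heq, ih, hdrop, heq]
          simp [List.cons_prefix_cons]
        · rw [if_neg heq]
          simp only [Bool.false_eq_true, false_iff, hdrop]
          intro hpre
          exact heq (List.cons_prefix_cons.mp hpre).1.symm
      · rw [dif_neg hlt]
        have : skill.drop idx = [] := List.drop_eq_nil_of_le (Nat.le_of_not_lt hlt)
        simp [this]
    · simp only [scanTree, hc, List.filter_cons]
      simpa [hc] using ih idx

lemma per_tree (skill : List Char) (skt : List Char) :
    (decide (skill.take (skt.filter (skill.contains ·)).length = skt.filter (skill.contains ·))) =
      scanTree skill skt 0 := by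
  rw [Bool.eq_iff_iff, decide_eq_true_iff, scanTree_iff, List.drop_zero]
  exact ⟨fun h => List.prefix_iff_eq_take.mpr h.symm, fun h => (List.prefix_iff_eq_take.mp h).symm⟩

-- ===== VERDICT (by name: the statement is the Claim_ definition above) =====
theorem solution_spec : Claim_equal_solution := by
  intro skill skill_trees _
  unfold Spec_solution solution solution_alt
  have hstep : (fun (answer : Int) (skt : String) =>
      let s := skt.toList.foldl
        (fun s ch => if skill.toList.contains ch then s ++ [ch] else s) []
      if skill.toList.take s.length = s then answer + 1 else answer) =
      (fun (answer : Int) (skt : String) =>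
        if scanTree skill.toList skt.toList 0 then answer + 1 else answer) := by
    funext answer skt
    rw [PySem.List.foldl_append_if_eq_filter]
    simp only [List.nil_append]
    rw [← per_tree skill.toList skt.toList]
    simp only [decide_eq_true_eq]
    rfl
  rw [hstep]
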